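-- pv_equiv track=rewrite | github.com/earlmedina/WebMapTools | WebMap_Tools.py | char_replace
-- ===== SOURCE A (Python) =====
-- def char_replace(name):
--     special = ['.',',','<','>',
--                '/','?',':',';',
--                "'",'"','[',']',
--                '{','}','|','\\',
--                '+','=','-',')',
--                '(','*','&','^',
--                '%','$','#','@',
--                '!','~','`']
--
--     for ele in special:
--         if ele in name:
--             name = name.replace(ele,'_')
--     return name
-- ===== SOURCE B (Python) =====
-- _SPECIAL = set(".,<>/?:;'\"[]{}|\\+=-)(*&^%$#@!~`")
--
-- def char_replace(name):
--     return ''.join('_' if c in _SPECIAL else c for c in name)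
-- ===== Notes on version B (the rewrite author's own statement) =====
-- stated objective: idiomatic
-- what changed: B builds the result in a single pass over the input characters (''.join with a set membership test), instead of A's 30 repeated full-string scans ('in' test plus str.replace per special character).
import Mathlib
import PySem

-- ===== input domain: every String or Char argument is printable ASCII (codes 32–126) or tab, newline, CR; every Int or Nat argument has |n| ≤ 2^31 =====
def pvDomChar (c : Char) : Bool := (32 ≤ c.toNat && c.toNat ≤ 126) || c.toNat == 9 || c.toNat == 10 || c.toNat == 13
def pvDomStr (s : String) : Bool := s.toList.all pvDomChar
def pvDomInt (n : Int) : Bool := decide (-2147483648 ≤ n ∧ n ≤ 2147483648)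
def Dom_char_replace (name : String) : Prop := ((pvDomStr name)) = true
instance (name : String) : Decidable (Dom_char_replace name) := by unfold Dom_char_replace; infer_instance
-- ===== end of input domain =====

-- B replaces A's 30 repeated full-string scans (per-special 'in' test + str.replace)
-- with one pass over the input joining '_' for special characters (idiomatic).


-- ===== PORT A =====
def specialA : List String :=
  [".", ",", "<", ">", "/", "?", ":", ";", "'", "\"", "[", "]",
   "{", "}", "|", "\\", "+", "=", "-", ")", "(", "*", "&", "^",
   "%", "$", "#", "@", "!", "~", "`"]

def char_replace (name : String) : String :=
  specialA.foldl
    (fun n ele => if PySem.Str.isIn ele n then PySem.Str.replace n ele "_" else n)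
    name

-- ===== PORT B =====
def specialB : List Char :=
  ['.', ',', '<', '>', '/', '?', ':', ';', '\'', '"', '[', ']',
   '{', '}', '|', '\\', '+', '=', '-', ')', '(', '*', '&', '^',
   '%', '$', '#', '@', '!', '~', '`']

def char_replace_alt (name : String) : String :=
  String.ofList (name.toList.map (fun c => if specialB.contains c then '_' else c))

-- ===== PRECONDITION & SPEC =====
def Spec_char_replace (name : String) (out : String) : Prop := out = char_replace_alt name
instance (name : String) (out : String) : Decidable (Spec_char_replace name out) := by unfold Spec_char_replace; infer_instance

-- ===== CLAIM (what is proved, stated in full; the proofs are below) =====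
def Claim_equal_char_replace : Prop := ∀ (name : String), Dom_char_replace name → Spec_char_replace name (char_replace name)

-- ===== LEMMAS AND PROOFS =====

/-- one character replaced by one character: `replace` is `map`. -/
theorem go_single (c d : Char) : ∀ (l acc : List Char) (fuel : Nat), l.length ≤ fuel →
    PySem.Chars.replace.go [c] [d] fuel l acc
      = acc.reverse ++ l.map (fun x => if x = c then d else x) := by
  intro l
  induction l with
  | nil => intro acc fuel _; cases fuel <;> simp [PySem.Chars.replace.go]
  | cons a t ih =>
    intro acc fuel h
    cases fuel with
    | zero => simp at h
    | succ f =>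
      rw [PySem.Chars.replace.go]
      by_cases hac : c = a
      · subst hac
        simp only [List.isPrefixOf, beq_self_eq_true, Bool.and_true, if_true,
          List.length_cons, List.drop_succ_cons, List.length_nil, List.drop_zero,
          List.reverse_cons, List.reverse_nil, List.nil_append, List.singleton_append]
        rw [ih (d :: acc) f (by simpa using h)]
        simp
      · have : ([c].isPrefixOf (a :: t)) = false := by
          simp [List.isPrefixOf, hac]
        rw [this]
        simp only [Bool.false_eq_true, if_false]
        rw [ih (a :: acc) f (by simpa using h)]
        simp only [List.reverse_cons, List.map_cons, List.append_assoc, List.singleton_append]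
        rw [if_neg (fun h' => hac h'.symm)]

theorem replace_single (s : List Char) (c d : Char) :
    PySem.Chars.replace s [c] [d] = s.map (fun x => if x = c then d else x) := by
  rw [PySem.Chars.replace]
  simp only [List.isEmpty_cons, Bool.false_eq_true, if_false]
  simpa using go_single c d s [] s.length le_rfl

theorem singleton_infix (c : Char) (l : List Char) : [c] <:+: l ↔ c ∈ l := by
  constructor
  · intro h; exact h.sublist.subset (List.mem_singleton_self c)
  · intro h
    obtain ⟨s, t, rfl⟩ := List.append_of_mem h
    exact ⟨s, t, by simp⟩

theorem map_id_of_not_mem (c d : Char) (l : List Char) (h : c ∉ l) :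
    l.map (fun x => if x = c then d else x) = l := by
  rw [List.map_congr_left (fun x hx => if_neg (by rintro rfl; exact h hx))]
  simp

/-- one step of A's loop, on the character list. -/
theorem stepA (n : String) (c : Char) :
    (if PySem.Str.isIn (String.ofList [c]) n then PySem.Str.replace n (String.ofList [c]) "_" else n).toList
      = n.toList.map (fun x => if x = c then '_' else x) := by
  by_cases h : PySem.Str.isIn (String.ofList [c]) n = true
  · rw [if_pos h, PySem.Str.toList_replace, String.toList_ofList]
    have : ("_" : String).toList = ['_'] := rfl
    rw [this]
    exact replace_single n.toList c '_'
  · rw [if_neg h]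
    have hc : c ∉ n.toList := by
      intro hm
      exact h ((PySem.Str.isIn_iff_infix _ _).mpr
        (by rw [String.toList_ofList]; exact (singleton_infix c n.toList).mpr hm))
    exact (map_id_of_not_mem c '_' n.toList hc).symm

/-- A's fold over a list of single-character strings, on the character list. -/
theorem foldA (cs : List Char) : ∀ (n : String),
    ((cs.map (fun c => String.ofList [c])).foldl
      (fun n ele => if PySem.Str.isIn ele n then PySem.Str.replace n ele "_" else n) n).toList
    = cs.foldl (fun acc c => acc.map (fun x => if x = c then '_' else x)) n.toList := by
  induction cs with
  | nil => intro n; rfl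
  | cons c t ih =>
    intro n
    simp only [List.map_cons, List.foldl_cons]
    rw [ih, stepA]

/-- fold of maps is map of folds. -/
theorem mapfold (cs : List Char) : ∀ (s : List Char),
    cs.foldl (fun acc c => acc.map (fun x => if x = c then '_' else x)) s
      = s.map (fun x => cs.foldl (fun y c => if y = c then '_' else y) x) := by
  induction cs with
  | nil => intro s; simp
  | cons c t ih =>
    intro s
    simp only [List.foldl_cons]
    rw [ih, List.map_map]
    rfl

theorem pointwise (cs : List Char) : ∀ (x : Char), '_' ∉ cs →
    cs.foldl (fun y c => if y = c then '_' else y) x = if x ∈ cs then '_' else x := by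
  induction cs with
  | nil => intro x _; simp
  | cons c t ih =>
    intro x h
    have hu : '_' ∉ t := fun hm => h (List.mem_cons_of_mem _ hm)
    simp only [List.foldl_cons, List.mem_cons]
    by_cases hx : x = c
    · rw [if_pos hx, ih '_' hu]
      simp [hx]
    · rw [if_neg hx, ih x hu]
      simp [hx]

-- ===== VERDICT (by name: the statement is the Claim_ definition above) =====
theorem char_replace_spec : Claim_equal_char_replace := by
  intro name _
  show char_replace name = char_replace_alt name
  have hmk : specialA = specialB.map (fun c => String.ofList [c]) := rfl
  have h1 : (char_replace name).toList
      = name.toList.map (fun x => if specialB.contains x then '_' else x) := by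
    rw [char_replace, hmk, foldA, mapfold]
    refine List.map_congr_left (fun x _ => ?_)
    rw [pointwise specialB x (by decide)]
    by_cases hx : x ∈ specialB
    · rw [if_pos hx, if_pos (List.contains_iff_mem.mpr hx)]
    · rw [if_neg hx, if_neg (fun hc => hx (List.contains_iff_mem.mp hc))]
  calc char_replace name = String.ofList (char_replace name).toList := String.ofList_toList.symm
    _ = char_replace_alt name := by rw [h1]; rfl
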